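-- pv_equiv track=rewrite | github.com/6reg/linux_func_fun | aba2.py | get_aba
-- ===== SOURCE A (Python) =====
-- def get_aba(s):
--     v = "aeiouAEIOU"
--     r = ""
--     for ch in s:
--         if ch in v:
--             aba = make_aba(ch)
--             r += aba
--         else:
--             r += ch
--     return r
--
-- def make_aba(vowel):
--     return vowel + "b" + vowel.lower()
-- ===== SOURCE B (Python) =====
-- def get_aba(s):
--     # staged rewriting: one global replace pass per vowel; lowercase vowels are
--     # processed before the uppercase ones whose expansions insert them, so no
--     # inserted character is ever expanded again
--     for v in "aeiouAEIOU":
--         s = s.replace(v, v + "b" + v.lower())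
--     return s
-- ===== Notes on version B (the rewrite author's own statement) =====
-- stated objective: faster
-- what changed: Replaced the single per-character scan with a vowel-membership branch and string accumulation by ten staged whole-string replace passes, one global s.replace per vowel, ordered so lowercase vowels are rewritten before the uppercase ones whose expansions insert them.
import Mathlib
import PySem

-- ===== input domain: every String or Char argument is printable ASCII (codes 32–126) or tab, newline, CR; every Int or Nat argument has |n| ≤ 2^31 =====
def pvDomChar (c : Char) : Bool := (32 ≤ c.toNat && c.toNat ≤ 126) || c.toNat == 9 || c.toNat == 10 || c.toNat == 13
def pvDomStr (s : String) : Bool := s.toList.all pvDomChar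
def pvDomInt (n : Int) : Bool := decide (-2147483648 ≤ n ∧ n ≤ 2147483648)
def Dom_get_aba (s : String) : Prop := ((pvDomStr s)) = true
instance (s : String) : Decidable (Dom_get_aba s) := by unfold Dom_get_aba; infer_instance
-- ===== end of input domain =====

-- B replaces A's single per-character scan-and-branch by ten staged whole-string
-- replace passes (one s.replace per vowel, lowercase before uppercase); equal
-- return values are proved on all strings.

-- ===== PORT A =====
-- make_aba(vowel) = vowel + "b" + vowel.lower()  (always called on a single vowel char)
def make_aba (vowel : Char) : List Char := [vowel, 'b', PySem.Chars.lowerChar vowel]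

def get_aba (s : String) : String :=
  let v := "aeiouAEIOU".toList
  String.ofList (s.toList.foldl
    (fun r ch => if ch ∈ v then r ++ make_aba ch else r ++ [ch]) [])

-- ===== PORT B =====
-- for v in "aeiouAEIOU": s = s.replace(v, v + "b" + v.lower())
def get_aba_alt (s : String) : String :=
  "aeiouAEIOU".toList.foldl
    (fun t v => PySem.Str.replace t (String.ofList [v])
                  (String.ofList [v, 'b', PySem.Chars.lowerChar v])) s

-- ===== PRECONDITION & SPEC =====
def Spec_get_aba (s : String) (out : String) : Prop := out = get_aba_alt s
instance (s : String) (out : String) : Decidable (Spec_get_aba s out) := by unfold Spec_get_aba; infer_instance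

-- ===== CLAIM (what is proved, stated in full; the proofs are below) =====
def Claim_equal_get_aba : Prop := ∀ (s : String), Dom_get_aba s → Spec_get_aba s (get_aba s)

-- ===== LEMMAS AND PROOFS =====

-- one replace pass for a single-character pattern, per character
def repOne (v : Char) (new : List Char) (c : Char) : List Char :=
  if c = v then new else [c]

-- composed effect of the remaining passes on one character
def passG : List Char → Char → List Char
  | [], c => [c]
  | v :: vs, c => (repOne v [v, 'b', PySem.Chars.lowerChar v] c).flatMap (passG vs)

theorem replace_go_single (v : Char) (new : List Char) :
    ∀ (l acc : List Char) (fuel : Nat), l.length ≤ fuel →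
      PySem.Chars.replace.go [v] new fuel l acc =
        acc.reverse ++ l.flatMap (repOne v new) := by
  intro l
  induction l with
  | nil =>
    intro acc fuel _
    cases fuel <;> simp [PySem.Chars.replace.go]
  | cons c t ih =>
    intro acc fuel hf
    cases fuel with
    | zero => simp at hf
    | succ n =>
      simp only [PySem.Chars.replace.go]
      by_cases h : c = v
      · subst h
        rw [if_pos (by simp [List.isPrefixOf])]
        have hdrop : List.drop [c].length (c :: t) = t := rfl
        rw [hdrop, ih (new.reverse ++ acc) n (by simpa using Nat.lt_succ_iff.mp (by simpa using hf))]
        simp [repOne, List.flatMap_cons]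
      · rw [if_neg (by simp [List.isPrefixOf]; exact Ne.symm h)]
        rw [ih (c :: acc) n (by simpa using Nat.lt_succ_iff.mp (by simpa using hf))]
        simp [repOne, h, List.flatMap_cons]

theorem replace_single (v : Char) (new l : List Char) :
    PySem.Chars.replace l [v] new = l.flatMap (repOne v new) := by
  simp only [PySem.Chars.replace, List.isEmpty_cons, Bool.false_eq_true, if_false]
  simpa using replace_go_single v new l [] l.length le_rfl

theorem foldl_replace_eq_flatMap (vs : List Char) :
    ∀ l : List Char,
      vs.foldl (fun t v =>
          PySem.Chars.replace t [v] [v, 'b', PySem.Chars.lowerChar v]) l =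
        l.flatMap (passG vs) := by
  induction vs with
  | nil => intro l; simp [passG]
  | cons v vs ih =>
    intro l
    simp only [List.foldl_cons]
    rw [replace_single, ih, List.flatMap_assoc]
    rfl

theorem passG_id (c : Char) : ∀ vs : List Char, c ∉ vs → passG vs c = [c] := by
  intro vs
  induction vs with
  | nil => intro _; rfl
  | cons v vs ih =>
    intro h
    simp only [List.mem_cons, not_or] at h
    simp [passG, repOne, h.1, ih h.2]

theorem passG_vowels (c : Char) :
    passG "aeiouAEIOU".toList c =
      if c ∈ "aeiouAEIOU".toList then make_aba c else [c] := by
  by_cases h : c ∈ "aeiouAEIOU".toList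
  · rw [if_pos h]
    have h' : c ∈ ['a','e','i','o','u','A','E','I','O','U'] := by
      simpa using h
    simp only [List.mem_cons, List.not_mem_nil, or_false] at h'
    rcases h' with h' | h' | h' | h' | h' | h' | h' | h' | h' | h' <;> subst h' <;> decide
  · rw [if_neg h]
    exact passG_id c _ h

theorem string_fold_eq (vs : List Char) :
    ∀ t : String,
      vs.foldl (fun t v => PySem.Str.replace t (String.ofList [v])
                  (String.ofList [v, 'b', PySem.Chars.lowerChar v])) t =
        String.ofList (vs.foldl (fun l v =>
          PySem.Chars.replace l [v] [v, 'b', PySem.Chars.lowerChar v]) t.toList) := by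
  induction vs with
  | nil => intro t; simp
  | cons v vs ih =>
    intro t
    simp only [List.foldl_cons]
    rw [ih]
    congr 1
    simp [PySem.Str.replace]

-- ===== VERDICT (by name: the statement is the Claim_ definition above) =====
theorem get_aba_spec : Claim_equal_get_aba := by
  intro s _
  show get_aba s = get_aba_alt s
  show String.ofList (s.toList.foldl
      (fun r ch => if ch ∈ "aeiouAEIOU".toList then r ++ make_aba ch else r ++ [ch]) []) =
    "aeiouAEIOU".toList.foldl
      (fun t v => PySem.Str.replace t (String.ofList [v])
        (String.ofList [v, 'b', PySem.Chars.lowerChar v])) s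
  rw [string_fold_eq, foldl_replace_eq_flatMap]
  congr 1
  have hfold := PySem.List.foldl_congr_mem s.toList
      (fun r ch => if ch ∈ "aeiouAEIOU".toList then r ++ make_aba ch else r ++ [ch])
      (fun r ch => r ++ (if ch ∈ "aeiouAEIOU".toList then make_aba ch else [ch])) []
      (by intro r ch _; dsimp only; split <;> rfl)
  rw [hfold, PySem.List.foldl_append_eq_flatMap]
  simp only [List.nil_append]
  exact List.flatMap_congr (fun c _ => (passG_vowels c).symm)
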